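-- pv_equiv track=rewrite | github.com/sujaybh/RHEED_tooling_suite | backend/blob_analysis.py | _greedy_assign
-- ===== SOURCE A (Python) =====
-- def _greedy_assign(centers: list, ref_centers: list) -> list:
--     """
--     One-to-one assignment of `centers[j]` to `ref_centers[i]` by minimum
--     Euclidean distance (greedy, guaranteed permutation).
--     Returns assignment[j] = i.
--     """
--     K = len(centers)
--     pairs = []
--     for j in range(K):
--         for i in range(K):
--             dx = centers[j][0] - ref_centers[i][0]
--             dy = centers[j][1] - ref_centers[i][1]
--             pairs.append((dx * dx + dy * dy, j, i))
--     pairs.sort()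
--
--     assignment: dict[int, int] = {}
--     used_j: set[int] = set()
--     used_i: set[int] = set()
--     for _, j, i in pairs:
--         if j not in used_j and i not in used_i:
--             assignment[j] = i
--             used_j.add(j)
--             used_i.add(i)
--     return [assignment[j] for j in range(K)]
-- ===== SOURCE B (Python) =====
-- def _greedy_assign(centers: list, ref_centers: list) -> list:
--     """Same greedy one-to-one nearest assignment, but instead of sorting all
--     K*K pairs and sweeping, repeatedly scan the pair list for the minimum
--     available (dist, j, i) triple and assign it, until none is available."""
--     K = len(centers)
--     pairs = []
--     for j in range(K):
--         for i in range(K):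
--             dx = centers[j][0] - ref_centers[i][0]
--             dy = centers[j][1] - ref_centers[i][1]
--             pairs.append((dx * dx + dy * dy, j, i))
--
--     assignment: dict[int, int] = {}
--     used_j: set[int] = set()
--     used_i: set[int] = set()
--     while True:
--         best = None
--         for p in pairs:
--             if p[1] not in used_j and p[2] not in used_i and (best is None or p < best):
--                 best = p
--         if best is None:
--             break
--         _, j, i = best
--         assignment[j] = i
--         used_j.add(j)
--         used_i.add(i)
--     return [assignment[j] for j in range(K)]
-- ===== Notes on version B (the rewrite author's own statement) =====
-- stated objective: alternative
-- what changed: B keeps A's pair construction but replaces the sort-all-K^2-pairs-then-greedy-sweep by a selection loop that repeatedly scans the unsorted pair list for the minimum available (dist, j, i) triple and assigns it until none remains.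
import Mathlib
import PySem

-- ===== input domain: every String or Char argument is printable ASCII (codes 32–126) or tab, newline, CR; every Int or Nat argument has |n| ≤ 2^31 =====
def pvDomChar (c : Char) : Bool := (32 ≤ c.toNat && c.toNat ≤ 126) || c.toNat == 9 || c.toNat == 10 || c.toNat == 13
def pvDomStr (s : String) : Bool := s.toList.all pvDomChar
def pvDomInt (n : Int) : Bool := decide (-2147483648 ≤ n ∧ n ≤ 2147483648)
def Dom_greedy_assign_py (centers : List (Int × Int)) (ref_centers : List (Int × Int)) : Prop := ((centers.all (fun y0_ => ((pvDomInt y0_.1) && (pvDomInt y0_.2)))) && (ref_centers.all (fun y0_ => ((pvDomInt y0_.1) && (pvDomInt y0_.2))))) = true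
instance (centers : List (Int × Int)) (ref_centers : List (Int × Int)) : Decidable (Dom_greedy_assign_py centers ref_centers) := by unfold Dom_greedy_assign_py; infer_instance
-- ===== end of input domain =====

-- B replaces A's build-all-pairs + sort + single greedy sweep by repeated min-scans over the
-- unsorted pair list (objective: alternative algorithm, no speed claim).

-- ===== shared helpers (both Pythons contain these identical pieces of code) =====

-- Python's '<' on int 3-tuples: lexicographic comparison, written out component by component (exact).
def pvTLt (a b : Int × Int × Int) : Bool :=
  decide (a.1 < b.1) ||
    (decide (a.1 = b.1) &&
      (decide (a.2.1 < b.2.1) || (decide (a.2.1 = b.2.1) && decide (a.2.2 < b.2.2))))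

-- one pair (dx*dx + dy*dy, j, i); pyGet? none (IndexError) is excluded by Pre_, so getD is exact
def pvTrip (centers ref_centers : List (Int × Int)) (j i : Int) : Int × Int × Int :=
  let c := (PySem.List.pyGet? centers j).getD (0, 0)
  let r := (PySem.List.pyGet? ref_centers i).getD (0, 0)
  let dx := c.1 - r.1
  let dy := c.2 - r.2
  (dx * dx + dy * dy, j, i)

-- the nested pair-building loop, identical in both Pythons (K = len(centers) inlined)
def pvMkPairs (centers ref_centers : List (Int × Int)) : List (Int × Int × Int) :=
  (PySem.List.pyRange 0 (centers.length : Int) 1).foldl (fun acc j =>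
    (PySem.List.pyRange 0 (centers.length : Int) 1).foldl (fun acc i =>
      acc ++ [pvTrip centers ref_centers j i]) acc) []

-- state of the greedy phase: (assignment dict, used_j set, used_i set)
abbrev pvSt : Type := PySem.Dict Int Int × PySem.Set Int × PySem.Set Int

-- 'j not in used_j and i not in used_i'
def pvAvail (uj ui : PySem.Set Int) (p : Int × Int × Int) : Bool :=
  !(PySem.Set.contains uj p.2.1) && !(PySem.Set.contains ui p.2.2)

-- 'assignment[j] = i; used_j.add(j); used_i.add(i)'
def pvUpd (S : pvSt) (p : Int × Int × Int) : pvSt :=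
  (PySem.Dict.insert S.1 p.2.1 p.2.2, PySem.Set.add S.2.1 p.2.1, PySem.Set.add S.2.2 p.2.2)

-- ===== PORT A =====

-- 'pairs.sort()': the PySem.List.sorted algorithm (stable foldl/insertBy insertion sort) with
-- Python's 3-tuple lexicographic comparator pvTLt written out (exact).
def pvSortPairs (pairs : List (Int × Int × Int)) : List (Int × Int × Int) :=
  pairs.foldl (fun acc x => PySem.List.insertBy pvTLt x acc) []

-- A's greedy sweep body: 'if j not in used_j and i not in used_i: assign'
def pvStepA (S : pvSt) (p : Int × Int × Int) : pvSt :=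
  if pvAvail S.2.1 S.2.2 p then pvUpd S p else S

-- '[assignment[j] for j in range(K)]'; KeyError is unreachable under Pre_ (the complete K×K
-- pair list assigns every j), so getD is exact
def greedy_assign_py (centers : List (Int × Int)) (ref_centers : List (Int × Int)) : List Int :=
  (PySem.List.pyRange 0 (centers.length : Int) 1).map (fun j =>
    PySem.Dict.getD
      ((pvSortPairs (pvMkPairs centers ref_centers)).foldl pvStepA
        (PySem.Dict.empty, PySem.Set.empty, PySem.Set.empty)).1 j 0)

-- ===== PORT B =====

-- B's inner scan: 'for p in pairs: if available and (best is None or p < best): best = p'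
def pvScanStep (uj ui : PySem.Set Int) (best : Option (Int × Int × Int)) (p : Int × Int × Int) :
    Option (Int × Int × Int) :=
  if pvAvail uj ui p then
    match best with
    | none => some p
    | some b => if pvTLt p b then some p else some b
  else best

def pvMinScan (pairs : List (Int × Int × Int)) (uj ui : PySem.Set Int) :
    Option (Int × Int × Int) :=
  pairs.foldl (pvScanStep uj ui) none

-- B's 'while True' loop; each non-break iteration makes the selected pair unavailable for good,
-- so pairs.length + 1 fuel is never exhausted before the break (exact)
def pvSelLoop (pairs : List (Int × Int × Int)) : Nat → pvSt → pvSt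
  | 0, S => S
  | fuel + 1, S =>
    match pvMinScan pairs S.2.1 S.2.2 with
    | none => S
    | some p => pvSelLoop pairs fuel (pvUpd S p)

def greedy_assign_py_alt (centers : List (Int × Int)) (ref_centers : List (Int × Int)) : List Int :=
  (PySem.List.pyRange 0 (centers.length : Int) 1).map (fun j =>
    PySem.Dict.getD
      (pvSelLoop (pvMkPairs centers ref_centers) ((pvMkPairs centers ref_centers).length + 1)
        (PySem.Dict.empty, PySem.Set.empty, PySem.Set.empty)).1 j 0)

-- ===== PRECONDITION & SPEC =====
-- Python A evaluates ref_centers[i] for every i < len(centers): IndexError exactly when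
-- ref_centers is shorter than centers; those inputs (where A raises) are excluded.
def Pre_greedy_assign_py (centers : List (Int × Int)) (ref_centers : List (Int × Int)) : Prop :=
  centers.length ≤ ref_centers.length
instance (centers : List (Int × Int)) (ref_centers : List (Int × Int)) : Decidable (Pre_greedy_assign_py centers ref_centers) := by unfold Pre_greedy_assign_py; infer_instance

def pvWitness_greedy_assign_py : (List (Int × Int)) × (List (Int × Int)) :=
  ([(0, 0), (1, 1)], [(2, 2), (0, 0)])

def Spec_greedy_assign_py (centers : List (Int × Int)) (ref_centers : List (Int × Int)) (out : List Int) : Prop := out = greedy_assign_py_alt centers ref_centers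
instance (centers : List (Int × Int)) (ref_centers : List (Int × Int)) (out : List Int) : Decidable (Spec_greedy_assign_py centers ref_centers out) := by unfold Spec_greedy_assign_py; infer_instance

-- ===== CLAIM (what is proved, stated in full; the proofs are below) =====
def Claim_equal_greedy_assign_py : Prop := ∀ (centers : List (Int × Int)) (ref_centers : List (Int × Int)), Dom_greedy_assign_py centers ref_centers → Pre_greedy_assign_py centers ref_centers → Spec_greedy_assign_py centers ref_centers (greedy_assign_py centers ref_centers)

-- ===== LEMMAS AND PROOFS =====

-- comparator facts (strict total lexicographic order)
theorem pvTLt_asymm {a b : Int × Int × Int} (h : pvTLt a b = true) : pvTLt b a = false := by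
  obtain ⟨a1, a2, a3⟩ := a; obtain ⟨b1, b2, b3⟩ := b
  simp only [pvTLt, Bool.or_eq_true, Bool.and_eq_true, decide_eq_true_eq,
    Bool.or_eq_false_iff, Bool.and_eq_false_iff, decide_eq_false_iff_not] at h ⊢
  omega

theorem pvTLt_trans {a b c : Int × Int × Int} (h1 : pvTLt a b = true) (h2 : pvTLt b c = true) :
    pvTLt a c = true := by
  obtain ⟨a1, a2, a3⟩ := a; obtain ⟨b1, b2, b3⟩ := b; obtain ⟨c1, c2, c3⟩ := c
  simp only [pvTLt, Bool.or_eq_true, Bool.and_eq_true, decide_eq_true_eq] at h1 h2 ⊢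
  omega

theorem pvTLt_connex {a b : Int × Int × Int} (h : a ≠ b) :
    pvTLt a b = true ∨ pvTLt b a = true := by
  obtain ⟨a1, a2, a3⟩ := a; obtain ⟨b1, b2, b3⟩ := b
  simp only [ne_eq, Prod.mk.injEq, not_and] at h
  simp only [pvTLt, Bool.or_eq_true, Bool.and_eq_true, decide_eq_true_eq]
  by_cases h1 : a1 = b1
  · by_cases h2 : a2 = b2
    · have := h h1 h2; omega
    · omega
  · omega

-- insertion preserves the multiset
theorem pv_insertBy_perm (bef : (Int × Int × Int) → (Int × Int × Int) → Bool)
    (x : Int × Int × Int) (ys : List (Int × Int × Int)) :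
    (PySem.List.insertBy bef x ys).Perm (x :: ys) := by
  induction ys with
  | nil => simp [PySem.List.insertBy]
  | cons y ys ih =>
    by_cases h : bef x y = true
    · simp [PySem.List.insertBy, h]
    · simp only [PySem.List.insertBy, h]
      exact (ih.cons y).trans (List.Perm.swap x y ys)

-- insertion preserves strict sortedness (elements pairwise distinct)
theorem pv_insertBy_pairwise (x : Int × Int × Int) (ys : List (Int × Int × Int))
    (hx : ∀ y ∈ ys, x ≠ y) (hp : ys.Pairwise (fun a b => pvTLt a b = true)) :
    (PySem.List.insertBy pvTLt x ys).Pairwise (fun a b => pvTLt a b = true) := by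
  induction ys with
  | nil => simp [PySem.List.insertBy]
  | cons y ys ih =>
    rcases List.pairwise_cons.mp hp with ⟨hy, hys⟩
    by_cases h : pvTLt x y = true
    · simp only [PySem.List.insertBy, h, if_true]
      refine List.pairwise_cons.mpr ⟨?_, hp⟩
      intro z hz
      rcases List.mem_cons.mp hz with rfl | hz
      · exact h
      · exact pvTLt_trans h (hy z hz)
    · simp only [PySem.List.insertBy, h]
      refine List.pairwise_cons.mpr ⟨?_, ih (fun z hz => hx z (List.mem_cons_of_mem y hz)) hys⟩
      intro z hz
      rcases (PySem.List.mem_insertBy pvTLt x z ys).mp hz with rfl | hz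
      · rcases pvTLt_connex (hx y List.mem_cons_self) with hc | hc
        · exact absurd hc h
        · exact hc
      · exact hy z hz

-- the insertion-sort fold: permutation + strict sortedness
theorem pv_sortFold (P : List (Int × Int × Int)) :
    ∀ acc : List (Int × Int × Int),
      (∀ x ∈ P, ∀ y ∈ acc, x ≠ y) → P.Nodup →
      acc.Pairwise (fun a b => pvTLt a b = true) →
      (P.foldl (fun acc x => PySem.List.insertBy pvTLt x acc) acc).Perm (acc ++ P) ∧
      (P.foldl (fun acc x => PySem.List.insertBy pvTLt x acc) acc).Pairwise
        (fun a b => pvTLt a b = true) := by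
  induction P with
  | nil => intro acc _ _ hp; exact ⟨by simp, by simpa using hp⟩
  | cons x P ih =>
    intro acc hdis hnd hp
    rcases List.nodup_cons.mp hnd with ⟨hxP, hndP⟩
    have hxacc : ∀ y ∈ acc, x ≠ y := hdis x List.mem_cons_self
    have hdis' : ∀ z ∈ P, ∀ y ∈ PySem.List.insertBy pvTLt x acc, z ≠ y := by
      intro z hz y hy
      rcases (PySem.List.mem_insertBy pvTLt x y acc).mp hy with rfl | hy
      · exact fun he => hxP (he ▸ hz)
      · exact hdis z (List.mem_cons_of_mem x hz) y hy
    have hins := pv_insertBy_pairwise x acc hxacc hp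
    rcases ih (PySem.List.insertBy pvTLt x acc) hdis' hndP hins with ⟨hperm, hpw⟩
    refine ⟨?_, hpw⟩
    simp only [List.foldl_cons]
    refine hperm.trans ?_
    have h1 : (PySem.List.insertBy pvTLt x acc ++ P).Perm ((x :: acc) ++ P) :=
      (pv_insertBy_perm pvTLt x acc).append_right P
    exact h1.trans (by simpa using List.perm_middle.symm)

-- pairs as a flat list of triples
theorem pv_mkPairs_eq (centers ref_centers : List (Int × Int)) :
    pvMkPairs centers ref_centers =
      (PySem.List.pyRange 0 (centers.length : Int) 1).flatMap
        (fun j => (PySem.List.pyRange 0 (centers.length : Int) 1).map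
          (pvTrip centers ref_centers j)) := by
  unfold pvMkPairs
  have hcong := PySem.List.foldl_congr_mem
    (l := PySem.List.pyRange 0 (centers.length : Int) 1)
    (init := ([] : List (Int × Int × Int)))
    (f := fun acc j => (PySem.List.pyRange 0 (centers.length : Int) 1).foldl
      (fun acc i => acc ++ [pvTrip centers ref_centers j i]) acc)
    (g := fun acc j => acc ++ (PySem.List.pyRange 0 (centers.length : Int) 1).map
      (pvTrip centers ref_centers j))
    (fun acc j _ => PySem.List.foldl_append_singleton_eq_map _ _ acc)
  exact hcong.trans (by simpa using PySem.List.foldl_append_eq_flatMap _ _ [])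

theorem pv_pairs_nodup (centers ref_centers : List (Int × Int)) :
    (pvMkPairs centers ref_centers).Nodup := by
  have hsnd : (pvMkPairs centers ref_centers).map (fun p => p.2) =
      (PySem.List.pyRange 0 (centers.length : Int) 1).flatMap
        (fun j => (PySem.List.pyRange 0 (centers.length : Int) 1).map (fun i => (j, i))) := by
    rw [pv_mkPairs_eq, List.map_flatMap]
    simp [List.map_map, Function.comp_def, pvTrip]
  have hR : (PySem.List.pyRange 0 (centers.length : Int) 1).Nodup := by
    rw [PySem.List.pyRange_zero_natCast]
    exact (List.nodup_range).map (fun a b hab => by exact_mod_cast hab)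
  have hmap : ((pvMkPairs centers ref_centers).map (fun p => p.2)).Nodup := by
    rw [hsnd, List.nodup_flatMap]
    refine ⟨fun j _ => hR.map (fun a b hab => by simpa using hab), ?_⟩
    exact hR.pairwise_of_forall_ne (fun a _ b _ hne z hz1 hz2 => by
      simp only [List.mem_map] at hz1 hz2
      obtain ⟨i, _, rfl⟩ := hz1
      obtain ⟨i2, _, heq⟩ := hz2
      injection heq with h1 _
      exact hne h1.symm)
  exact hmap.of_map _

-- availability facts
theorem pv_avail_upd_self (S : pvSt) (p : Int × Int × Int) :
    pvAvail (pvUpd S p).2.1 (pvUpd S p).2.2 p = false := by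
  simp [pvAvail, pvUpd, PySem.Set.contains, PySem.Set.mem_add]

theorem pv_avail_mono {S : pvSt} {p q : Int × Int × Int}
    (h : pvAvail (pvUpd S p).2.1 (pvUpd S p).2.2 q = true) : pvAvail S.2.1 S.2.2 q = true := by
  simp only [pvAvail, pvUpd, Bool.and_eq_true, Bool.not_eq_true',
    PySem.Set.contains, List.contains_eq_mem, decide_eq_false_iff_not] at h ⊢
  have h1 := h.1; have h2 := h.2
  rw [PySem.Set.mem_add] at h1 h2
  exact ⟨fun hm => h1 (Or.inl hm), fun hm => h2 (Or.inl hm)⟩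

-- min-scan characterisation
theorem pv_scan_keep (uj ui : PySem.Set Int) (P : List (Int × Int × Int)) :
    ∀ acc, (∀ q ∈ P, pvAvail uj ui q = false) → P.foldl (pvScanStep uj ui) acc = acc := by
  induction P with
  | nil => intro acc _; rfl
  | cons q P ih =>
    intro acc h
    simp only [List.foldl_cons, pvScanStep, h q List.mem_cons_self, Bool.false_eq_true, if_false]
    exact ih acc (fun z hz => h z (List.mem_cons_of_mem q hz))

theorem pv_scan_min_acc (uj ui : PySem.Set Int) (P : List (Int × Int × Int)) :
    ∀ p, (∀ q ∈ P, pvAvail uj ui q = true → pvTLt p q = true) →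
      P.foldl (pvScanStep uj ui) (some p) = some p := by
  induction P with
  | nil => intro p _; rfl
  | cons q P ih =>
    intro p h
    by_cases hq : pvAvail uj ui q = true
    · have hlt := h q List.mem_cons_self hq
      simp only [List.foldl_cons, pvScanStep, hq, if_true, pvTLt_asymm hlt,
        Bool.false_eq_true, if_false]
      exact ih p (fun z hz => h z (List.mem_cons_of_mem q hz))
    · simp only [List.foldl_cons, pvScanStep, hq]
      exact ih p (fun z hz => h z (List.mem_cons_of_mem q hz))

theorem pv_scan_min_beat (uj ui : PySem.Set Int) (P : List (Int × Int × Int)) :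
    ∀ b p, P.Nodup → pvTLt p b = true → p ∈ P → pvAvail uj ui p = true →
      (∀ q ∈ P, pvAvail uj ui q = true → q = p ∨ pvTLt p q = true) →
      P.foldl (pvScanStep uj ui) (some b) = some p := by
  induction P with
  | nil => intro b p _ _ hmem _ _; exact absurd hmem (List.not_mem_nil)
  | cons q P ih =>
    intro b p hnd hlt hmem hav hminn
    rcases List.nodup_cons.mp hnd with ⟨hqP, hndP⟩
    rcases List.mem_cons.mp hmem with rfl | hmem'
    · simp only [List.foldl_cons, pvScanStep, hav, if_true, hlt, if_true]
      refine pv_scan_min_acc uj ui P p (fun z hz hzav => ?_)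
      rcases hminn z (List.mem_cons_of_mem p hz) hzav with rfl | h
      · exact absurd hz hqP
      · exact h
    · have hqp : q ≠ p := fun he => hqP (he ▸ hmem')
      by_cases hqav : pvAvail uj ui q = true
      · have hpq : pvTLt p q = true := by
          rcases hminn q List.mem_cons_self hqav with rfl | h
          · exact absurd rfl hqp
          · exact h
        by_cases hqb : pvTLt q b = true
        · simp only [List.foldl_cons, pvScanStep, hqav, if_true, hqb, if_true]
          exact ih q p hndP hpq hmem' hav
            (fun z hz hzav => hminn z (List.mem_cons_of_mem q hz) hzav)
        · simp only [List.foldl_cons, pvScanStep, hqav, if_true, hqb, Bool.false_eq_true, if_false]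
          exact ih b p hndP hlt hmem' hav
            (fun z hz hzav => hminn z (List.mem_cons_of_mem q hz) hzav)
      · simp only [List.foldl_cons, pvScanStep, hqav]
        exact ih b p hndP hlt hmem' hav
          (fun z hz hzav => hminn z (List.mem_cons_of_mem q hz) hzav)

theorem pv_scan_min (uj ui : PySem.Set Int) (P : List (Int × Int × Int)) :
    ∀ p, P.Nodup → p ∈ P → pvAvail uj ui p = true →
      (∀ q ∈ P, pvAvail uj ui q = true → q = p ∨ pvTLt p q = true) →
      pvMinScan P uj ui = some p := by
  induction P with
  | nil => intro p _ hmem _ _; exact absurd hmem (List.not_mem_nil)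
  | cons q P ih =>
    intro p hnd hmem hav hminn
    rcases List.nodup_cons.mp hnd with ⟨hqP, hndP⟩
    rcases List.mem_cons.mp hmem with rfl | hmem'
    · simp only [pvMinScan, List.foldl_cons, pvScanStep, hav, if_true]
      refine pv_scan_min_acc uj ui P p (fun z hz hzav => ?_)
      rcases hminn z (List.mem_cons_of_mem p hz) hzav with rfl | h
      · exact absurd hz hqP
      · exact h
    · have hqp : q ≠ p := fun he => hqP (he ▸ hmem')
      by_cases hqav : pvAvail uj ui q = true
      · have hpq : pvTLt p q = true := by
          rcases hminn q List.mem_cons_self hqav with rfl | h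
          · exact absurd rfl hqp
          · exact h
        simp only [pvMinScan, List.foldl_cons, pvScanStep, hqav, if_true]
        exact pv_scan_min_beat uj ui P q p hndP hpq hmem' hav
          (fun z hz hzav => hminn z (List.mem_cons_of_mem q hz) hzav)
      · simp only [pvMinScan, List.foldl_cons, pvScanStep, hqav]
        exact ih p hndP hmem' hav
          (fun z hz hzav => hminn z (List.mem_cons_of_mem q hz) hzav)

-- core: the sorted greedy sweep equals the repeated-min loop
theorem pv_core (P : List (Int × Int × Int)) (hnd : P.Nodup) :
    ∀ L : List (Int × Int × Int), ∀ S : pvSt, ∀ fuel : Nat,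
      L.Pairwise (fun a b => pvTLt a b = true) →
      (∀ q ∈ L, q ∈ P) →
      (∀ q ∈ P, pvAvail S.2.1 S.2.2 q = true → q ∈ L) →
      L.length ≤ fuel →
      L.foldl pvStepA S = pvSelLoop P fuel S := by
  intro L
  induction L with
  | nil =>
    intro S fuel _ _ h2 _
    have hall : ∀ q ∈ P, pvAvail S.2.1 S.2.2 q = false := by
      intro q hq
      cases hqa : pvAvail S.2.1 S.2.2 q with
      | false => rfl
      | true => exact absurd (h2 q hq hqa) (List.not_mem_nil)
    have hnone : pvMinScan P S.2.1 S.2.2 = none := pv_scan_keep S.2.1 S.2.2 P none hall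
    cases fuel with
    | zero => rfl
    | succ f => simp [pvSelLoop, hnone]
  | cons p L' ih =>
    intro S fuel hpw h1 h2 hlen
    rcases List.pairwise_cons.mp hpw with ⟨hp1, hp2⟩
    by_cases hav : pvAvail S.2.1 S.2.2 p = true
    · have hmin : pvMinScan P S.2.1 S.2.2 = some p := by
        refine pv_scan_min S.2.1 S.2.2 P p hnd (h1 p List.mem_cons_self) hav ?_
        intro q hq hqa
        rcases List.mem_cons.mp (h2 q hq hqa) with rfl | hq'
        · exact Or.inl rfl
        · exact Or.inr (hp1 q hq')
      cases fuel with
      | zero => simp at hlen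
      | succ f =>
        simp only [List.foldl_cons, pvStepA, hav, if_true, pvSelLoop, hmin]
        refine ih (pvUpd S p) f hp2 (fun q hq => h1 q (List.mem_cons_of_mem p hq)) ?_
          (by simp at hlen ⊢; omega)
        intro q hq hqa
        have hqS : pvAvail S.2.1 S.2.2 q = true := pv_avail_mono hqa
        rcases List.mem_cons.mp (h2 q hq hqS) with rfl | hq'
        · exact absurd hqa (by simp [pv_avail_upd_self])
        · exact hq'
    · simp only [List.foldl_cons, pvStepA, hav]
      refine ih S fuel hp2 (fun q hq => h1 q (List.mem_cons_of_mem p hq)) ?_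
        (le_trans (by simp) hlen)
      intro q hq hqa
      rcases List.mem_cons.mp (h2 q hq hqa) with rfl | hq'
      · exact absurd hqa hav
      · exact hq'

theorem pv_main (centers ref_centers : List (Int × Int)) :
    greedy_assign_py centers ref_centers = greedy_assign_py_alt centers ref_centers := by
  have hnd := pv_pairs_nodup centers ref_centers
  have hsort := pv_sortFold (pvMkPairs centers ref_centers) [] (by simp) hnd (by simp)
  have hperm : (pvSortPairs (pvMkPairs centers ref_centers)).Perm (pvMkPairs centers ref_centers) := by
    simpa [pvSortPairs] using hsort.1
  have hpw : (pvSortPairs (pvMkPairs centers ref_centers)).Pairwise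
      (fun a b => pvTLt a b = true) := by
    simpa [pvSortPairs] using hsort.2
  have hcore := pv_core (pvMkPairs centers ref_centers) hnd
    (pvSortPairs (pvMkPairs centers ref_centers))
    (PySem.Dict.empty, PySem.Set.empty, PySem.Set.empty)
    ((pvMkPairs centers ref_centers).length + 1)
    hpw
    (fun q hq => hperm.mem_iff.mp hq)
    (fun q hq _ => hperm.mem_iff.mpr hq)
    (by rw [hperm.length_eq]; omega)
  unfold greedy_assign_py greedy_assign_py_alt
  rw [hcore]

-- ===== VERDICT (by name: the statement is the Claim_ definition above) =====
theorem greedy_assign_py_spec : Claim_equal_greedy_assign_py := by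
  intro centers ref_centers _ _
  unfold Spec_greedy_assign_py
  exact pv_main centers ref_centers
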